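-- pv_equiv track=rewrite | github.com/awaisirshad1/COE892-labs | lab4/server/rover_utils.py | assign_mines_serial_numbers
-- ===== SOURCE A (Python) =====
-- def assign_mines_serial_numbers(map_array, mine_array):
--     mine_coordinates = {}
--     serial_index = 0
--
--     for i in range(len(map_array)):
--         for j in range(len(map_array[i])):
--             if map_array[i][j] == 1 and serial_index < len(mine_array):
--                 mine_coordinates[(i, j)] = mine_array[serial_index]
--                 serial_index += 1
--
--     return mine_coordinates
-- ===== SOURCE B (Python) =====
-- def assign_mines_serial_numbers(map_array, mine_array):
--     result = {}
--     serials = mine_array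
--     for i, row in enumerate(map_array):
--         if not serials:
--             break
--         cols = [j for j, c in enumerate(row) if c == 1]
--         for j, s in zip(cols, serials):
--             result[(i, j)] = s
--         serials = serials[len(cols):]
--     return result
-- ===== Notes on version B (the rewrite author's own statement) =====
-- stated objective: alternative
-- what changed: B restructures the computation per row: it threads the remaining-serials list as a consumable queue, for each row collects its mine columns, pairs that row's chunk of serials in one batch and slices them off, breaking out early once the serials run out, instead of A's cell-level scan with a global serial_index counter and a bound check at every cell.
import Mathlib
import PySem

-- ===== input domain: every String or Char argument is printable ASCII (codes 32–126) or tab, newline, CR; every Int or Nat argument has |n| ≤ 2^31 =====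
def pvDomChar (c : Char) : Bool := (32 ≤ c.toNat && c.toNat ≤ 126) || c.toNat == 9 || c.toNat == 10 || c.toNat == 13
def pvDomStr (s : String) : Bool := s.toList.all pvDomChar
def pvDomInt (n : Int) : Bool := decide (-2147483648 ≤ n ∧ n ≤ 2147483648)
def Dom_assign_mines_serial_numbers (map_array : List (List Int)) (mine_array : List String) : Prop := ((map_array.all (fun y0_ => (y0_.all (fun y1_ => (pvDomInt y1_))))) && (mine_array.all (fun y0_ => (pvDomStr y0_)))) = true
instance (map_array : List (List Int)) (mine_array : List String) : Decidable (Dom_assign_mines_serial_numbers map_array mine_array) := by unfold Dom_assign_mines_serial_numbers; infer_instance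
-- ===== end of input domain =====

-- B processes the grid row by row, threading the remaining serials as a consumable
-- queue (per-row chunk pairing, early break), instead of A's cell-level counter;
-- objective: alternative decomposition of the same cost.

-- ===== PORT A =====
-- Python dict assignment d[(i,j)] = v on an assoc list flattened to triples:
-- overwrite in place if the key is present, else append (exact dict semantics).
def pyDictInsert (d : List (Int × Int × String)) (i j : Int) (v : String) : List (Int × Int × String) :=
  if d.any (fun p => p.1 == i && p.2.1 == j) then
    d.map (fun p => if p.1 == i && p.2.1 == j then (i, j, v) else p)
  else d ++ [(i, j, v)]

-- body of the inner 'for j in range(len(map_array[i]))' loop; the state is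
-- (mine_coordinates, serial_index); mine_array[serial_index] is guarded by
-- serial_index < len(mine_array), so getD is exact here.
def amsnInner (mine_array : List String) (i : Int) (st : List (Int × Int × String) × Nat) (jx : Int × Int) : List (Int × Int × String) × Nat :=
  if jx.2 = 1 ∧ st.2 < mine_array.length then
    (pyDictInsert st.1 i jx.1 (mine_array.getD st.2 ""), st.2 + 1)
  else st

-- body of the outer 'for i in range(len(map_array))' loop
def amsnRow (mine_array : List String) (st : List (Int × Int × String) × Nat) (ir : Int × List Int) : List (Int × Int × String) × Nat :=
  (PySem.List.enumerate ir.2).foldl (amsnInner mine_array ir.1) st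

def assign_mines_serial_numbers (map_array : List (List Int)) (mine_array : List String) : List (Int × Int × String) :=
  ((PySem.List.enumerate map_array).foldl (amsnRow mine_array) ([], 0)).1

-- ===== PORT B =====
-- [j for j, c in enumerate(row) if c == 1]
def amsnAltCols (row : List Int) : List Int :=
  (PySem.List.enumerate row).filterMap (fun jc => if jc.2 = 1 then some jc.1 else none)

-- the outer for-loop with its break, as recursion over the enumerated rows; the
-- state is (remaining serials, result dict); all inserted keys (i, j) are fresh
-- (i strictly grows), so each row's dict updates are appends of the zipped chunk.
def amsnAltGo : List (Int × List Int) → List String → List (Int × Int × String) → List (Int × Int × String)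
  | [], _, result => result
  | (i, row) :: rest, serials, result =>
    if serials = [] then result
    else
      let cols := amsnAltCols row
      amsnAltGo rest (serials.drop cols.length)
        (result ++ (cols.zip serials).map (fun p => (i, p.1, p.2)))

def assign_mines_serial_numbers_alt (map_array : List (List Int)) (mine_array : List String) : List (Int × Int × String) :=
  amsnAltGo (PySem.List.enumerate map_array) mine_array []

-- ===== PRECONDITION & SPEC =====
def Spec_assign_mines_serial_numbers (map_array : List (List Int)) (mine_array : List String) (out : List (Int × Int × String)) : Prop := out = assign_mines_serial_numbers_alt map_array mine_array
instance (map_array : List (List Int)) (mine_array : List String) (out : List (Int × Int × String)) : Decidable (Spec_assign_mines_serial_numbers map_array mine_array out) := by unfold Spec_assign_mines_serial_numbers; infer_instance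

-- ===== CLAIM (what is proved, stated in full; the proofs are below) =====
def Claim_equal_assign_mines_serial_numbers : Prop := ∀ (map_array : List (List Int)) (mine_array : List String), Dom_assign_mines_serial_numbers map_array mine_array → Spec_assign_mines_serial_numbers map_array mine_array (assign_mines_serial_numbers map_array mine_array)

-- ===== LEMMAS AND PROOFS =====

-- proof-side canonical form: row-major mine coordinates (enumerate from an arbitrary start)
def pvFlat (p : (Int × Int) × String) : Int × Int × String := (p.1.1, p.1.2, p.2)

def pvRcFrom (i s : Int) (row : List Int) : List (Int × Int) :=
  (PySem.List.enumerate row s).filterMap (fun jx => if jx.2 = 1 then some (i, jx.1) else none)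

def pvCoordsFrom (s : Int) (m : List (List Int)) : List (Int × Int) :=
  (PySem.List.enumerate m s).flatMap (fun ir => pvRcFrom ir.1 0 ir.2)

theorem pvMem_rcFrom {i s : Int} {row : List Int} {c : Int × Int} (h : c ∈ pvRcFrom i s row) : c.1 = i ∧ s ≤ c.2 := by
  unfold pvRcFrom at h
  rcases List.mem_filterMap.1 h with ⟨jx, hjx, heq⟩
  rcases (PySem.List.mem_enumerate_iff _ _ _).1 hjx with ⟨k, hk, rfl⟩
  by_cases h1 : row[k] = 1
  · simp [h1] at heq; subst heq; exact ⟨rfl, by simp⟩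
  · simp [h1] at heq

theorem pvDictInsert_fresh (d : List (Int × Int × String)) (i j : Int) (v : String)
    (h : ∀ p ∈ d, ¬(p.1 = i ∧ p.2.1 = j)) : pyDictInsert d i j v = d ++ [(i, j, v)] := by
  unfold pyDictInsert
  have hany : d.any (fun p => p.1 == i && p.2.1 == j) = false := by
    simp only [List.any_eq_false]
    intro p hp
    have := h p hp
    simp only [Bool.and_eq_true, beq_iff_eq]
    tauto
  simp [hany]

theorem pvZip_append (a b : List (Int × Int)) (m : List String) :
    (a ++ b).zip m = a.zip m ++ b.zip (m.drop a.length) := by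
  induction a generalizing m with
  | nil => simp
  | cons x a ih =>
    cases m with
    | nil => simp
    | cons y m => simp [List.zip_cons_cons, ih]

theorem pvDrop_min (m : List String) (k n : Nat) :
    m.drop (k + min n (m.length - k)) = m.drop (k + n) := by
  by_cases h : n ≤ m.length - k
  · rw [Nat.min_eq_left h]
  · rw [List.drop_eq_nil_of_le (by omega), List.drop_eq_nil_of_le (by omega)]

theorem pvInner_eq (mine : List String) (i : Int) :
    ∀ (row : List Int) (s : Int) (d : List (Int × Int × String)),
      (∀ p ∈ d, p.1 ≠ i ∨ p.2.1 < s) →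
      (PySem.List.enumerate row s).foldl (amsnInner mine i) (d, d.length) =
        (d ++ ((pvRcFrom i s row).zip (mine.drop d.length)).map pvFlat,
         d.length + ((pvRcFrom i s row).zip (mine.drop d.length)).length) := by
  intro row
  induction row with
  | nil => intro s d _; simp [PySem.List.enumerate_nil, pvRcFrom]
  | cons x row ih =>
    intro s d hd
    rw [PySem.List.enumerate_cons, List.foldl_cons]
    by_cases hx : x = 1
    · by_cases hk : d.length < mine.length
      · have hstep : amsnInner mine i (d, d.length) (s, x) =
            (d ++ [(i, s, mine.getD d.length "")], d.length + 1) := by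
          unfold amsnInner
          rw [if_pos ⟨hx, hk⟩]
          rw [pvDictInsert_fresh]
          intro p hp hps
          rcases hd p hp with h' | h' <;> [exact h' hps.1; omega]
        rw [hstep]
        have hlen : d.length + 1 = (d ++ [(i, s, mine.getD d.length "")]).length := by simp
        rw [hlen, ih (s+1)]
        · have hdrop : mine.drop d.length = mine[d.length] :: mine.drop (d.length + 1) :=
            List.drop_eq_getElem_cons hk
          have hrc : pvRcFrom i s (x :: row) = (i, s) :: pvRcFrom i (s+1) row := by
            unfold pvRcFrom
            rw [PySem.List.enumerate_cons, List.filterMap_cons]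
            simp [hx]
          have hgd : mine.getD d.length "" = mine[d.length] := List.getD_eq_getElem mine "" hk
          rw [hrc, hdrop, List.zip_cons_cons, List.map_cons]
          simp [pvFlat]
          exact ⟨by rw [List.getElem?_eq_getElem hk]; rfl, by omega⟩
        · intro p hp
          rcases List.mem_append.1 hp with hp' | hp'
          · rcases hd p hp' with h' | h' <;> [exact Or.inl h'; exact Or.inr (by omega)]
          · simp at hp'; subst hp'; exact Or.inr (by simp)
      · have hnil : mine.drop d.length = [] := List.drop_eq_nil_of_le (by omega)
        have hstep : amsnInner mine i (d, d.length) (s, x) = (d, d.length) := by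
          unfold amsnInner
          rw [if_neg]; intro h; exact hk h.2
        rw [hstep, ih (s+1) d (fun p hp => by rcases hd p hp with h'|h' <;> [exact Or.inl h'; exact Or.inr (by omega)])]
        simp [hnil]
    · have hstep : amsnInner mine i (d, d.length) (s, x) = (d, d.length) := by
        unfold amsnInner
        rw [if_neg]; intro h; exact hx h.1
      have hrc : pvRcFrom i s (x :: row) = pvRcFrom i (s+1) row := by
        unfold pvRcFrom
        rw [PySem.List.enumerate_cons, List.filterMap_cons]
        simp [hx]
      rw [hstep, ih (s+1) d (fun p hp => by rcases hd p hp with h'|h' <;> [exact Or.inl h'; exact Or.inr (by omega)]), hrc]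

theorem pvOuter_eq (mine : List String) :
    ∀ (m : List (List Int)) (s : Int) (d : List (Int × Int × String)),
      (∀ p ∈ d, p.1 < s) →
      (PySem.List.enumerate m s).foldl (amsnRow mine) (d, d.length) =
        (d ++ ((pvCoordsFrom s m).zip (mine.drop d.length)).map pvFlat,
         d.length + ((pvCoordsFrom s m).zip (mine.drop d.length)).length) := by
  intro m
  induction m with
  | nil => intro s d _; simp [PySem.List.enumerate_nil, pvCoordsFrom]
  | cons row rest ih =>
    intro s d hd
    rw [PySem.List.enumerate_cons, List.foldl_cons]
    have hrow : amsnRow mine (d, d.length) (s, row) =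
        (d ++ ((pvRcFrom s 0 row).zip (mine.drop d.length)).map pvFlat,
         d.length + ((pvRcFrom s 0 row).zip (mine.drop d.length)).length) := by
      unfold amsnRow
      exact pvInner_eq mine s row 0 d (fun p hp => Or.inl (by have := hd p hp; omega))
    set zr := ((pvRcFrom s 0 row).zip (mine.drop d.length)).map pvFlat with hzr
    have hlen : d.length + ((pvRcFrom s 0 row).zip (mine.drop d.length)).length = (d ++ zr).length := by
      simp [hzr]
    rw [hrow, hlen, ih (s+1)]
    · have hcoords : pvCoordsFrom s (row :: rest) = pvRcFrom s 0 row ++ pvCoordsFrom (s+1) rest := by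
        unfold pvCoordsFrom
        rw [PySem.List.enumerate_cons, List.flatMap_cons]
      rw [hcoords, pvZip_append]
      have hzrlen : zr.length = min (pvRcFrom s 0 row).length (mine.length - d.length) := by
        simp [hzr, List.length_zip]
      have hdd : (d ++ zr).length = d.length + min (pvRcFrom s 0 row).length (mine.length - d.length) := by
        simp [hzrlen]
      have hdrop2 : mine.drop ((d ++ zr).length) =
          (mine.drop d.length).drop (pvRcFrom s 0 row).length := by
        rw [List.drop_drop, hdd]
        exact pvDrop_min mine d.length (pvRcFrom s 0 row).length
      rw [hdrop2]
      simp [hzr]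
      omega
    · intro p hp
      rcases List.mem_append.1 hp with hp' | hp'
      · have := hd p hp'; omega
      · rcases List.mem_map.1 hp' with ⟨q, hq, rfl⟩
        have hq1 := (pvMem_rcFrom (List.of_mem_zip hq).1).1
        simp [pvFlat, hq1]

-- B-side: a row's coordinate list is the (i, ·)-tagging of its mine columns
theorem pvRcFrom_eq_cols (i : Int) (row : List Int) :
    pvRcFrom i 0 row = (amsnAltCols row).map (fun j => (i, j)) := by
  unfold pvRcFrom amsnAltCols
  rw [List.map_filterMap]
  apply List.filterMap_congr
  intro jx _
  by_cases h : jx.2 = 1 <;> simp [h]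

theorem pvAltGo_eq :
    ∀ (m : List (List Int)) (s : Int) (serials : List String) (d : List (Int × Int × String)),
      amsnAltGo (PySem.List.enumerate m s) serials d =
        d ++ ((pvCoordsFrom s m).zip serials).map pvFlat := by
  intro m
  induction m with
  | nil => intro s serials d; simp [PySem.List.enumerate_nil, amsnAltGo, pvCoordsFrom]
  | cons row rest ih =>
    intro s serials d
    rw [PySem.List.enumerate_cons]
    by_cases hs : serials = []
    · subst hs; simp [amsnAltGo]
    · rw [amsnAltGo, if_neg hs]
      have hcoords : pvCoordsFrom s (row :: rest) = pvRcFrom s 0 row ++ pvCoordsFrom (s+1) rest := by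
        unfold pvCoordsFrom
        rw [PySem.List.enumerate_cons, List.flatMap_cons]
      have hzipmap : (pvRcFrom s 0 row).zip serials =
          ((amsnAltCols row).zip serials).map (fun p => ((s, p.1), p.2)) := by
        rw [pvRcFrom_eq_cols, List.zip_map_left]
        apply List.map_congr_left; intro p _; rfl
      have hlen : (pvRcFrom s 0 row).length = (amsnAltCols row).length := by
        rw [pvRcFrom_eq_cols, List.length_map]
      rw [ih (s+1), hcoords, pvZip_append, hlen, List.map_append, hzipmap,
        List.map_map, List.append_assoc]
      rfl

-- ===== VERDICT (by name: the statement is the Claim_ definition above) =====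
theorem assign_mines_serial_numbers_spec : Claim_equal_assign_mines_serial_numbers := by
  intro map_array mine_array _
  unfold Spec_assign_mines_serial_numbers assign_mines_serial_numbers assign_mines_serial_numbers_alt
  have h0 : (0 : Nat) = ([] : List (Int × Int × String)).length := rfl
  rw [h0, pvOuter_eq mine_array map_array 0 [] (by simp)]
  rw [pvAltGo_eq map_array 0 mine_array []]
  simp
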